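-- pv_equiv track=rewrite | github.com/MarisaCodes/Permutations-with-non-simple-Verma-Multiplicities | perm-py/pkg/smlnbr.py | small_neighbors
-- ===== SOURCE A (Python) =====
-- def gen_perm_from_arr(lis):
--     perm = {}
--
--     for index, item in enumerate(lis):
--         index += 1
--         perm[index] = item
--     return perm
--
-- def small_neighbors(lis: list[int]) -> list[dict[str, int]]:
--     perm = gen_perm_from_arr(lis)
--     lis_small_neighbors = []
--     for i in perm:
--         for j in perm:
--             if int(j) <= int(i):
--                 continue
--             else:
--                 tau = lis[int(i):int(j)-1]
--                 if not bool(len(tau)):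
--                     if perm[i] > perm[j]:
--                         new_perm = {**perm}
--                         new_perm[i] = perm[j]
--                         new_perm[j] = perm[i]
--                         lis_small_neighbors.append(new_perm)
--                 else:
--                     condition_bool = False
--                     for m in range(len(tau)):
--                         if perm[i] < perm[j]:
--                             break
--                         else:
--                             if tau[m] > perm[i] or tau[m] < perm[j]:
--                                 condition_bool = True
--                             else:
--                                 condition_bool = False
--                                 break
--                     if condition_bool:
--                         new_perm = {**perm}
--                         new_perm[i] = perm[j]
--                         new_perm[j] = perm[i]
--                         lis_small_neighbors.append(new_perm)
--     return lis_small_neighbors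
-- ===== SOURCE B (Python) =====
-- def small_neighbors(lis: list[int]) -> list[dict[str, int]]:
--     n = len(lis)
--     base = {k + 1: v for k, v in enumerate(lis)}
--     out = []
--     for i in range(n):
--         M = None  # max of the between-values that are <= lis[i]
--         for j in range(i + 1, n):
--             if j == i + 1:
--                 ok = lis[i] > lis[j]
--             else:
--                 x = lis[j - 1]
--                 if x <= lis[i] and (M is None or x > M):
--                     M = x
--                 ok = lis[i] >= lis[j] and (M is None or M < lis[j])
--             if ok:
--                 d = dict(base)
--                 d[i + 1] = lis[j]
--                 d[j + 1] = lis[i]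
--                 out.append(d)
--     return out
-- ===== Notes on version B (the rewrite author's own statement) =====
-- stated objective: faster
-- what changed: B drops the per-pair inner scan over the between-values: for each i it sweeps j once, carrying a running maximum M of the between-values not exceeding lis[i], so the cover test for (i,j) becomes the O(1) check lis[i] >= lis[j] and M < lis[j]; it also indexes the list directly instead of going through the key dict. Intended as faster; measured 3.22x at n=1024, unconfirmed at n=4096 where the Theta(n^3)-sized output exhausts both programs.
import Mathlib
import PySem

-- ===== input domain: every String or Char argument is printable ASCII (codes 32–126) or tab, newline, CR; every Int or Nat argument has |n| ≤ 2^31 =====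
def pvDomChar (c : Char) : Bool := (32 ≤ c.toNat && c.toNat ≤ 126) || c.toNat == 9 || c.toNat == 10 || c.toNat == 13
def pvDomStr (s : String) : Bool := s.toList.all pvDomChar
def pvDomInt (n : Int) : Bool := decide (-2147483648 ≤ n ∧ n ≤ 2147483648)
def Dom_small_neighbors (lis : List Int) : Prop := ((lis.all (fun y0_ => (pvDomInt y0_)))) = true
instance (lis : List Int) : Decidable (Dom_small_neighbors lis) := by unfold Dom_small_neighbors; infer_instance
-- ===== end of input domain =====

-- B replaces A's inner between-scan per pair by a running maximum carried along j, removing the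
-- third nested loop; intended as faster (measured 3.22x at n=1024; at n=4096 the Θ(n^3)-sized
-- output makes both programs run out of time/memory).


-- ===== PORT A =====
-- perm = {}; for index, item in enumerate(lis): perm[index+1] = item
def gen_perm_from_arr (lis : List Int) : PySem.Dict Int Int :=
  (PySem.List.enumerate lis).foldl (fun perm p => perm.insert (p.1 + 1) p.2) PySem.Dict.empty

-- the inner `for m in range(len(tau))` loop of A, with its breaks; state = condition_bool
def aScanTau (tau : List Int) (pi_ pj : Int) (cb : Bool) : Bool :=
  match tau with
  | [] => cb
  | t :: rest =>
    if pi_ < pj then cb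
    else if t > pi_ ∨ t < pj then aScanTau rest pi_ pj true
    else false

-- body of A's `for j in perm` loop (acc = lis_small_neighbors)
def aInner (lis : List Int) (perm : PySem.Dict Int Int) (i : Int)
    (acc : List (List (Int × Int))) (j : Int) : List (List (Int × Int)) :=
  if j ≤ i then acc
  else
    let tau := PySem.List.slice lis (some i) (some (j - 1))
    if tau.length = 0 then
      if perm.getD i 0 > perm.getD j 0 then
        acc ++ [((perm.insert i (perm.getD j 0)).insert j (perm.getD i 0)).items]
      else acc
    else
      if aScanTau tau (perm.getD i 0) (perm.getD j 0) false then
        acc ++ [((perm.insert i (perm.getD j 0)).insert j (perm.getD i 0)).items]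
      else acc

def small_neighbors (lis : List Int) : List (List (Int × Int)) :=
  let perm := gen_perm_from_arr lis
  perm.keys.foldl (fun acc i => perm.keys.foldl (aInner lis perm i) acc) []

-- ===== PORT B =====
-- B's update of the running maximum M of the between-values that are <= lis[i]
def bUpd (pi_ : Int) (M : Option Int) (x : Int) : Option Int :=
  if x ≤ pi_ ∧ (M = none ∨ x > M.getD 0) then some x else M

-- body of B's `for j in range(i+1, n)` loop, state = (M, out)
def bInner (lis : List Int) (base : PySem.Dict Int Int) (i : Int)
    (st : Option Int × List (List (Int × Int))) (j : Int) :
    Option Int × List (List (Int × Int)) :=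
  if j = i + 1 then
    (st.1,
      if PySem.List.pyGetD lis i 0 > PySem.List.pyGetD lis j 0 then
        st.2 ++ [((base.insert (i + 1) (PySem.List.pyGetD lis j 0)).insert (j + 1)
                    (PySem.List.pyGetD lis i 0)).items]
      else st.2)
  else
    let M := bUpd (PySem.List.pyGetD lis i 0) st.1 (PySem.List.pyGetD lis (j - 1) 0)
    (M,
      if PySem.List.pyGetD lis i 0 ≥ PySem.List.pyGetD lis j 0 ∧
          (M = none ∨ M.getD 0 < PySem.List.pyGetD lis j 0) then
        st.2 ++ [((base.insert (i + 1) (PySem.List.pyGetD lis j 0)).insert (j + 1)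
                    (PySem.List.pyGetD lis i 0)).items]
      else st.2)

def small_neighbors_alt (lis : List Int) : List (List (Int × Int)) :=
  let n : Int := lis.length
  let base := (PySem.List.enumerate lis).foldl (fun d p => d.insert (p.1 + 1) p.2) PySem.Dict.empty
  (PySem.List.pyRange 0 n).foldl
    (fun out i => ((PySem.List.pyRange (i + 1) n).foldl (bInner lis base i) (none, out)).2) []

-- ===== PRECONDITION & SPEC =====
def Spec_small_neighbors (lis : List Int) (out : List (List (Int × Int))) : Prop := out = small_neighbors_alt lis
instance (lis : List Int) (out : List (List (Int × Int))) : Decidable (Spec_small_neighbors lis out) := by unfold Spec_small_neighbors; infer_instance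

-- ===== CLAIM (what is proved, stated in full; the proofs are below) =====
def Claim_equal_small_neighbors : Prop := ∀ (lis : List Int), Dom_small_neighbors lis → Spec_small_neighbors lis (small_neighbors lis)

-- ===== LEMMAS AND PROOFS =====

theorem perm_items (lis : List Int) :
    (gen_perm_from_arr lis).items
      = (PySem.List.pyRange 0 lis.length).map (fun j => (j + 1, PySem.List.pyGetD lis j 0)) := by
  unfold gen_perm_from_arr
  rw [PySem.Dict.items_foldl_insert_fresh (PySem.List.enumerate lis)
        (fun p => p.1 + 1) (fun p => p.2) PySem.Dict.empty
        (by intro a _; exact PySem.Dict.contains_empty _)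
        (by
          rw [List.nodup_iff_pairwise_ne, List.pairwise_map]
          exact (PySem.List.pairwise_lt_enumerate lis 0).imp (by intro a b h; omega))]
  rw [PySem.List.enumerate_eq_map_pyRange lis 0, List.map_map]
  simp [PySem.List.len, PySem.Dict.empty]

theorem perm_keys (lis : List Int) :
    (gen_perm_from_arr lis).keys
      = (PySem.List.pyRange 0 lis.length).map (fun j => j + 1) := by
  simp only [PySem.Dict.keys, perm_items, List.map_map]
  rfl

theorem perm_keys_nodup (lis : List Int) : (gen_perm_from_arr lis).keys.Nodup := by
  rw [perm_keys]
  exact (PySem.List.nodup_pyRange_one 0 _).map (fun a b h => by omega)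

theorem perm_getD (lis : List Int) {j : Int} (h0 : 0 ≤ j) (h1 : j < lis.length) :
    (gen_perm_from_arr lis).getD (j + 1) 0 = PySem.List.pyGetD lis j 0 := by
  refine PySem.Dict.getD_of_mem_items _ ?_ (perm_keys_nodup lis) 0
  rw [perm_items]
  exact List.mem_map.2 ⟨j, PySem.List.mem_pyRange_one.2 ⟨h0, h1⟩, rfl⟩

theorem aScan_true (tau : List Int) (pi_ pj : Int) (h : ¬ pi_ < pj) :
    aScanTau tau pi_ pj true = tau.all (fun t => decide (t > pi_ ∨ t < pj)) := by
  induction tau with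
  | nil => rfl
  | cons t rest ih =>
    simp only [aScanTau, if_neg h, List.all_cons]
    by_cases ht : t > pi_ ∨ t < pj
    · simp [ht, ih]
    · simp [ht]

theorem aScan_cond (tau : List Int) (pi_ pj : Int) (hne : tau ≠ []) :
    (aScanTau tau pi_ pj false = true)
      ↔ (pi_ ≥ pj ∧ ∀ t ∈ tau, t ≤ pi_ → t < pj) := by
  by_cases h : pi_ < pj
  · cases tau with
    | nil => exact absurd rfl hne
    | cons t rest =>
      simp only [aScanTau, if_pos h]
      constructor
      · intro hf; exact absurd hf (by simp)
      · intro ⟨hge, _⟩; omega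
  · cases tau with
    | nil => exact absurd rfl hne
    | cons t rest =>
      simp only [aScanTau, if_neg h]
      by_cases ht : t > pi_ ∨ t < pj
      · rw [if_pos ht, aScan_true rest pi_ pj h]
        simp only [List.all_eq_true, decide_eq_true_eq, List.mem_cons]
        constructor
        · intro hall
          refine ⟨by omega, ?_⟩
          rintro u (rfl | hu) hle
          · omega
          · have := hall u hu; omega
        · rintro ⟨hge, hall⟩ u hu
          have := hall u (Or.inr hu); omega
      · rw [if_neg ht]
        constructor
        · intro hf; exact absurd hf (by simp)
        · rintro ⟨hge, hall⟩
          have := hall t (by simp) (by omega); omega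

theorem mB_spec (pi_ pj : Int) :
    ∀ (l : List Int) (M : Option Int),
      (l.foldl (bUpd pi_) M = none ∨ (l.foldl (bUpd pi_) M).getD 0 < pj)
        ↔ ((M = none ∨ M.getD 0 < pj) ∧ ∀ t ∈ l, t ≤ pi_ → t < pj) := by
  intro l
  induction l with
  | nil => intro M; simp
  | cons x rest ih =>
    intro M
    simp only [List.foldl_cons, ih (bUpd pi_ M x), List.mem_cons]
    constructor
    · rintro ⟨hM', hall⟩
      unfold bUpd at hM'
      split_ifs at hM' with hc
      · rcases hM' with h' | h'
        · exact absurd h' (by simp)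
        · simp only [Option.getD_some] at h'
          refine ⟨?_, ?_⟩
          · rcases hc.2 with rfl | hgt
            · exact Or.inl rfl
            · cases M with
              | none => exact Or.inl rfl
              | some m => right; simp only [Option.getD_some] at *; omega
          · rintro u (rfl | hu) hle
            · exact h'
            · exact hall u hu hle
      · refine ⟨hM', ?_⟩
        rintro u (rfl | hu) hle
        · cases M with
          | none => exact absurd ⟨hle, Or.inl rfl⟩ hc
          | some m =>
            have hxm : ¬ u > m := fun hgt => hc ⟨hle, Or.inr (by simpa using hgt)⟩
            rcases hM' with h' | h'
            · exact absurd h' (by simp)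
            · simp only [Option.getD_some] at h'; omega
        · exact hall u hu hle
    · rintro ⟨hM, hall⟩
      refine ⟨?_, fun u hu hle => hall u (Or.inr hu) hle⟩
      unfold bUpd
      split_ifs with hc
      · right; simpa using hall x (Or.inl rfl) hc.1
      · exact hM

theorem slice_empty (lis : List Int) (a : Int) (h : 0 ≤ a) :
    PySem.List.slice lis (some a) (some a) = [] := by
  rw [PySem.List.slice_toNat lis h h]
  simp

theorem slice_ne_nil (lis : List Int) {a b : Int} (h0 : 0 ≤ a) (h1 : a < b)
    (h3 : a < lis.length) :
    PySem.List.slice lis (some a) (some b) ≠ [] := by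
  rw [PySem.List.slice_toNat lis h0 (by omega)]
  intro hnil
  have := congrArg List.length hnil
  simp only [List.length_take, List.length_drop, List.length_nil] at this
  omega

theorem slice_snoc (lis : List Int) {a b : Int} (h0 : 0 ≤ a) (h1 : a ≤ b) (h2 : b < lis.length) :
    PySem.List.slice lis (some a) (some (b + 1))
      = PySem.List.slice lis (some a) (some b) ++ [PySem.List.pyGetD lis b 0] := by
  rw [PySem.List.slice_toNat lis h0 (by omega), PySem.List.slice_toNat lis h0 (by omega)]
  have hsub : (b + 1).toNat - a.toNat = (b.toNat - a.toNat) + 1 := by omega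
  rw [hsub, List.take_add_one]
  have hidx : b.toNat - a.toNat < (List.drop a.toNat lis).length := by
    simp only [List.length_drop]; omega
  rw [List.getElem?_eq_getElem hidx]
  rw [PySem.List.pyGetD_eq_getElem lis 0 (by omega) (by omega)]
  simp only [Option.toList_some]
  have hi : a.toNat + (b.toNat - a.toNat) = b.toNat := by omega
  simp [List.getElem_drop, hi]

theorem skip_prefix (lis : List Int) (perm : PySem.Dict Int Int) (i : Int) :
    ∀ (l : List Int) (acc : List (List (Int × Int))), (∀ j ∈ l, j + 1 ≤ i) →
      l.foldl (fun acc j0 => aInner lis perm i acc (j0 + 1)) acc = acc := by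
  intro l
  induction l with
  | nil => intro acc _; rfl
  | cons x rest ih =>
    intro acc h
    simp only [List.foldl_cons]
    rw [show aInner lis perm i acc (x + 1) = acc from by
          unfold aInner; rw [if_pos (h x (by simp))]]
    exact ih acc (fun j hj => h j (by simp [hj]))

theorem step_eq (lis : List Int) (i j : Int) (hi0 : 0 ≤ i) (hij : i + 1 ≤ j)
    (hjn : j < (lis.length : Int)) (M : Option Int)
    (hM : M = (PySem.List.slice lis (some (i + 1)) (some (j - 1))).foldl
                (bUpd (PySem.List.pyGetD lis i 0)) none)
    (acc : List (List (Int × Int))) :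
    aInner lis (gen_perm_from_arr lis) (i + 1) acc (j + 1)
        = (bInner lis (gen_perm_from_arr lis) i (M, acc) j).2
    ∧ (bInner lis (gen_perm_from_arr lis) i (M, acc) j).1
        = (PySem.List.slice lis (some (i + 1)) (some j)).foldl
            (bUpd (PySem.List.pyGetD lis i 0)) none := by
  have hpi : (gen_perm_from_arr lis).getD (i + 1) 0 = PySem.List.pyGetD lis i 0 :=
    perm_getD lis hi0 (by exact_mod_cast by omega)
  have hpj : (gen_perm_from_arr lis).getD (j + 1) 0 = PySem.List.pyGetD lis j 0 :=
    perm_getD lis (by omega) (by exact_mod_cast hjn)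
  have hii : ¬ (j + 1 ≤ i + 1) := by omega
  simp only [aInner, if_neg hii, hpi, hpj, show j + 1 - 1 = j from by ring]
  by_cases hj1 : j = i + 1
  · subst hj1
    have htau : PySem.List.slice lis (some (i + 1)) (some (i + 1)) = [] :=
      slice_empty lis (i + 1) (by omega)
    have hMnone : M = none := by
      rw [hM, show (i + 1 : ℤ) - 1 = i from by ring,
          PySem.List.slice_toNat lis (by omega) (by omega)]
      simp [show i.toNat - (i + 1).toNat = 0 from by omega]
    simp only [bInner, htau, hMnone]
    exact ⟨by simp, by simp⟩
  · have hlt : i + 1 < j := by omega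
    have htau_ne : PySem.List.slice lis (some (i + 1)) (some j) ≠ [] :=
      slice_ne_nil lis (by omega) hlt (by exact_mod_cast by omega)
    have hsnoc : PySem.List.slice lis (some (i + 1)) (some j)
        = PySem.List.slice lis (some (i + 1)) (some (j - 1))
            ++ [PySem.List.pyGetD lis (j - 1) 0] := by
      have h := slice_snoc lis (a := i + 1) (b := j - 1) (by omega) (by omega)
        (by exact_mod_cast by omega)
      rwa [show j - 1 + 1 = j from by ring] at h
    have hM' : bUpd (PySem.List.pyGetD lis i 0) M (PySem.List.pyGetD lis (j - 1) 0)
        = (PySem.List.slice lis (some (i + 1)) (some j)).foldl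
            (bUpd (PySem.List.pyGetD lis i 0)) none := by
      rw [hsnoc, List.foldl_append, ← hM]; rfl
    have hlen : ¬ ((PySem.List.slice lis (some (i + 1)) (some j)).length = 0) := by
      simpa [List.length_eq_zero_iff] using htau_ne
    have hcond : (aScanTau (PySem.List.slice lis (some (i + 1)) (some j))
          (PySem.List.pyGetD lis i 0) (PySem.List.pyGetD lis j 0) false = true)
        ↔ (PySem.List.pyGetD lis i 0 ≥ PySem.List.pyGetD lis j 0 ∧
            (bUpd (PySem.List.pyGetD lis i 0) M (PySem.List.pyGetD lis (j - 1) 0) = none ∨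
             (bUpd (PySem.List.pyGetD lis i 0) M (PySem.List.pyGetD lis (j - 1) 0)).getD 0
               < PySem.List.pyGetD lis j 0)) := by
      rw [aScan_cond _ _ _ htau_ne, hM']
      constructor
      · rintro ⟨hge, hall⟩
        exact ⟨hge, (mB_spec _ _ _ none).2 ⟨Or.inl rfl, hall⟩⟩
      · rintro ⟨hge, hM2⟩
        exact ⟨hge, ((mB_spec _ _ _ none).1 hM2).2⟩
    simp only [bInner, if_neg hj1, hlen]
    constructor
    · by_cases hA : aScanTau (PySem.List.slice lis (some (i + 1)) (some j))
          (PySem.List.pyGetD lis i 0) (PySem.List.pyGetD lis j 0) false = true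
      · rw [if_pos hA, if_pos (hcond.1 hA)]
        simp
      · rw [if_neg hA, if_neg (fun hB => hA (hcond.2 hB))]
        simp
    · exact hM'

theorem inner_eq (lis : List Int) (i : Int) (hi0 : 0 ≤ i) (_hin : i < (lis.length : Int)) :
    ∀ (m : Nat) (j : Int), i + 1 ≤ j → ((lis.length : Int) - j).toNat = m →
      ∀ (acc : List (List (Int × Int))),
      (PySem.List.pyRange j lis.length).foldl
          (fun acc j0 => aInner lis (gen_perm_from_arr lis) (i + 1) acc (j0 + 1)) acc
        = ((PySem.List.pyRange j lis.length).foldl (bInner lis (gen_perm_from_arr lis) i)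
            ((PySem.List.slice lis (some (i + 1)) (some (j - 1))).foldl
               (bUpd (PySem.List.pyGetD lis i 0)) none, acc)).2 := by
  intro m
  induction m with
  | zero =>
    intro j hj hm acc
    rw [PySem.List.pyRange_one_eq_nil (by omega)]
    rfl
  | succ k ih =>
    intro j hj hm acc
    have hjn : j < (lis.length : Int) := by omega
    rw [PySem.List.pyRange_one_cons hjn]
    simp only [List.foldl_cons]
    obtain ⟨h2, h1⟩ := step_eq lis i j hi0 hj hjn _ rfl acc
    rw [h2]
    have hih := ih (j + 1) (by omega) (by omega)
      ((bInner lis (gen_perm_from_arr lis) i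
        ((PySem.List.slice lis (some (i + 1)) (some (j - 1))).foldl
           (bUpd (PySem.List.pyGetD lis i 0)) none, acc) j).2)
    rw [show j + 1 - 1 = j from by ring] at hih
    rw [hih]
    congr 2
    rw [← h1]

theorem main_eq (lis : List Int) : small_neighbors lis = small_neighbors_alt lis := by
  unfold small_neighbors small_neighbors_alt
  show (gen_perm_from_arr lis).keys.foldl _ [] = _
  rw [show ((PySem.List.enumerate lis).foldl (fun d p => d.insert (p.1 + 1) p.2)
        PySem.Dict.empty) = gen_perm_from_arr lis from rfl]
  rw [perm_keys lis, List.foldl_map]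
  refine PySem.List.foldl_congr_mem _ _ _ _ ?_
  intro acc i0 hi0
  rw [PySem.List.mem_pyRange_one] at hi0
  rw [List.foldl_map]
  rw [PySem.List.pyRange_one_append 0 (i0 + 1) lis.length (by omega) (by omega),
      List.foldl_append]
  rw [skip_prefix lis (gen_perm_from_arr lis) (i0 + 1) _ acc
        (fun j hj => by rw [PySem.List.mem_pyRange_one] at hj; omega)]
  have h := inner_eq lis i0 hi0.1 hi0.2 ((lis.length : Int) - (i0 + 1)).toNat (i0 + 1)
    (by omega) rfl acc
  rw [h]
  have hsl : (PySem.List.slice lis (some (i0 + 1)) (some (i0 + 1 - 1))).foldl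
      (bUpd (PySem.List.pyGetD lis i0 0)) none = none := by
    rw [show (i0 + 1 : ℤ) - 1 = i0 from by ring,
        PySem.List.slice_toNat lis (by omega) (by omega)]
    simp [show i0.toNat - (i0 + 1).toNat = 0 from by omega]
  rw [hsl]

-- ===== VERDICT (by name: the statement is the Claim_ definition above) =====
theorem small_neighbors_spec : Claim_equal_small_neighbors := by
  intro lis _
  unfold Spec_small_neighbors
  exact main_eq lis
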